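-- pv_equiv track=rewrite | github.com/JonathanServiaMandome/gsWord | utilities/aa_funciones.py | GetColumnasAR_CKG
-- ===== SOURCE A (Python) =====
-- def GetColumnasAR_CKG(arg=''):
-- 	columnas = []
-- 	columnas.append('checklist')
-- 	if arg == 'v':
-- 		columnas.append('deno_cchecklist')
-- 	columnas.append('tipo_accion')
-- 	if arg == 'v':
-- 		columnas.append('deno_tipo_accion')
--
-- 	dc = {}
-- 	for k in range(len(columnas)):
-- 		dc[columnas[k]] = k
-- 	return dc
-- ===== SOURCE B (Python) =====
-- def GetColumnasAR_CKG(arg=''):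
-- 	if arg == 'v':
-- 		return {'checklist': 0, 'deno_cchecklist': 1,
-- 			'tipo_accion': 2, 'deno_tipo_accion': 3}
-- 	return {'checklist': 0, 'tipo_accion': 1}
-- ===== Notes on version B (the rewrite author's own statement) =====
-- stated objective: simpler
-- what changed: Replaces the list-accumulation plus enumeration loop with a single branch returning the final name-to-index dict as a literal.
import Mathlib
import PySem

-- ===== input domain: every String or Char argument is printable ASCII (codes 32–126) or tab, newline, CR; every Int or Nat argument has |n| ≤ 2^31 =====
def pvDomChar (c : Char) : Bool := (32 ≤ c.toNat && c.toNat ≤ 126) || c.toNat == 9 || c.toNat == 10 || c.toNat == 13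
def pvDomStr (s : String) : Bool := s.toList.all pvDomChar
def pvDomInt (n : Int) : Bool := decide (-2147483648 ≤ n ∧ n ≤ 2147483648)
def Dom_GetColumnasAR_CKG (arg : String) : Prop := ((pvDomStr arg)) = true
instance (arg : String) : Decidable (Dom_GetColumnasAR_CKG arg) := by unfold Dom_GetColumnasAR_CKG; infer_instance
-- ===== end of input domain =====

-- B replaces A's list build + index loop by one branch returning the final dict literal (simpler).
-- ===== PORT A =====
def GetColumnasAR_CKG (arg : String) : List (String × Int) :=
  let columnas : List String := []
  let columnas := columnas ++ ["checklist"]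
  let columnas := if arg == "v" then columnas ++ ["deno_cchecklist"] else columnas
  let columnas := columnas ++ ["tipo_accion"]
  let columnas := if arg == "v" then columnas ++ ["deno_tipo_accion"] else columnas
  let dc : PySem.Dict String Int := PySem.Dict.empty
  let dc := (PySem.List.pyRange 0 (columnas.length : Int) 1).foldl
    (fun dc k => match PySem.List.pyGet? columnas k with
      | some c => PySem.Dict.insert dc c k
      | none => dc) dc
  dc.items

-- ===== PORT B =====
def GetColumnasAR_CKG_alt (arg : String) : List (String × Int) :=
  if arg == "v" then
    [("checklist", 0), ("deno_cchecklist", 1), ("tipo_accion", 2), ("deno_tipo_accion", 3)]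
  else
    [("checklist", 0), ("tipo_accion", 1)]

-- ===== PRECONDITION & SPEC =====
def Spec_GetColumnasAR_CKG (arg : String) (out : List (String × Int)) : Prop := out = GetColumnasAR_CKG_alt arg
instance (arg : String) (out : List (String × Int)) : Decidable (Spec_GetColumnasAR_CKG arg out) := by unfold Spec_GetColumnasAR_CKG; infer_instance

-- ===== CLAIM (what is proved, stated in full; the proofs are below) =====
def Claim_equal_GetColumnasAR_CKG : Prop := ∀ (arg : String), Dom_GetColumnasAR_CKG arg → Spec_GetColumnasAR_CKG arg (GetColumnasAR_CKG arg)

-- ===== LEMMAS AND PROOFS =====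

-- ===== VERDICT (by name: the statement is the Claim_ definition above) =====
theorem GetColumnasAR_CKG_spec : Claim_equal_GetColumnasAR_CKG := by
  intro arg _
  unfold Spec_GetColumnasAR_CKG GetColumnasAR_CKG GetColumnasAR_CKG_alt
  by_cases h : arg = "v"
  · subst h; rfl
  · simp only [beq_iff_eq, h, if_false]
    rfl
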